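-- pv_equiv track=rewrite | github.com/SANBIBiodiversityforLife/species | imports/views.py | convert_criteria_string
-- ===== SOURCE A (Python) =====
-- def convert_criteria_string(string):
--     # Construct a load of nested dictionaries with all of the individual components
--     cons = {}
--     for item in string.split('|'):
--         # B
--         letter = item[0].upper()
--         if letter not in cons:
--             cons[letter] = {}
--
--         # B1, sometimes you just have D with no number
--         if len(item) > 1:
--             number = item[1]
--             if number not in cons[letter]:
--                 cons[letter][number] = {}
--
--             # B1a or B1b_iii, sometimes you just have D1 with no letter
--             if len(item) > 2:
--                 small_letter = item[2].lower()
--                 if small_letter not in cons[letter][number]: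
--                     cons[letter][number][small_letter] = []
--
--                 if '_' in item:
--                     roman_numerals = item.split('_')[1]
--                     if roman_numerals not in cons[letter][number][small_letter]:
--                         cons[letter][number][small_letter].append(roman_numerals)
--
--     # Following is not used, just an example of what we're constructing
--     # output_example = {'A': {'2': {'a': [], 'b': []}}, 'B': {'1': {'a': [], 'b': ['i', 'ii', 'iii']}}}
--
--     # Join those dictionaries together, we also need to do some sorting once they are lists
--     letter_strings = []
--     for letter, number_dict in cons.items():
--         number_strings = []
--
--         for number, small_letter_dict in number_dict.items():
--             small_letter_strings = []
--
--             for small_letter, roman_numerals_list in small_letter_dict.items():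
--                 small_letter_string = small_letter
--                 if roman_numerals_list:
--                     small_letter_string += '(' + ','.join(roman_numerals_list) + ')'
--                 small_letter_strings.append(small_letter_string)
--
--             # small_letter_string now looks like this: 'ab(i,ii,iii)'
--             number_strings.append(number + ''.join(sorted(small_letter_strings)))
--
--         # number_strings now looks like this ['2ab(i,ii,iii)', '1a']
--         letter_strings.append(letter + '+'.join(sorted(number_strings)))
--
--     # letter_strings now looks like this ['A2ab(i,ii,iii)', 'C1a']
--
--     return '; '.join(sorted(letter_strings))
-- ===== SOURCE B (Python) =====
-- def convert_criteria_string(string):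
--     # Recompute per sorted distinct key at each level instead of building nested dicts.
--     toks = string.split('|')
--     letter_parts = []
--     for letter in sorted(set(t[0].upper() for t in toks)):
--         group = [t for t in toks if t[0].upper() == letter]
--         number_parts = []
--         for number in sorted(set(t[1] for t in group if len(t) > 1)):
--             ngroup = [t for t in group if len(t) > 1 and t[1] == number]
--             small_parts = []
--             for small in sorted(set(t[2].lower() for t in ngroup if len(t) > 2)):
--                 sgroup = [t for t in ngroup if len(t) > 2 and t[2].lower() == small]
--                 romans = []
--                 for t in sgroup:
--                     if '_' in t:
--                         r = t.split('_')[1]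
--                         if r not in romans:
--                             romans.append(r)
--                 part = small
--                 if romans:
--                     part += '(' + ','.join(romans) + ')'
--                 small_parts.append(part)
--             number_parts.append(number + ''.join(small_parts))
--         letter_parts.append(letter + '+'.join(number_parts))
--     return '; '.join(letter_parts)
-- ===== Notes on version B (the rewrite author's own statement) =====
-- stated objective: alternative
-- what changed: B replaces A's one-pass construction of nested dicts (letter -> number -> small letter -> roman list) and its post-hoc sorting of assembled strings by a direct rebuild: for each level it takes the sorted distinct keys and recomputes the group's content by filtering the token list, keeping only the roman-numeral dedup loop as a fold.
-- outside the precondition, e.g. on convert_criteria_string('|'): A raises IndexError, B raises IndexError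
import Mathlib
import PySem

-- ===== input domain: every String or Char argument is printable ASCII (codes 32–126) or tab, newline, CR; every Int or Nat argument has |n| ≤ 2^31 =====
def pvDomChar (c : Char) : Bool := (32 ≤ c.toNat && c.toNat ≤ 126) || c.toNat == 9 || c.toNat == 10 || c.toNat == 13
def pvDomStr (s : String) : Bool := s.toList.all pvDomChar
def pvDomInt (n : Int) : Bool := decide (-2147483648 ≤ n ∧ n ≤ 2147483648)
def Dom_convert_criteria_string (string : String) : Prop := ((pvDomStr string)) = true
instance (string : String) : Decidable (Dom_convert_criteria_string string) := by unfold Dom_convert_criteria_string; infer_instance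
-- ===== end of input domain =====

-- B recomputes each output group by filtering the token list per sorted distinct key at each of its three levels, instead of A's nested dicts rebuilt into sorted strings (objective: alternative decomposition, same cost class).

-- ===== PORT A =====
abbrev D3 := PySem.Dict Char (List (List Char))
abbrev D2 := PySem.Dict Char D3
abbrev D1 := PySem.Dict Char D2

def stepA (cons : D1) (item : List Char) : D1 :=
  match item with
  | [] => cons
  | c0 :: rest =>
    let letter := PySem.Chars.upperChar c0
    let cons1 := if cons.contains letter then cons else cons.insert letter PySem.Dict.empty
    match rest with
    | [] => cons1
    | number :: rest2 =>
      let sub := cons1.getD letter PySem.Dict.empty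
      let sub1 := if sub.contains number then sub else sub.insert number PySem.Dict.empty
      match rest2 with
      | [] => cons1.insert letter sub1
      | c2 :: _ =>
        let small := PySem.Chars.lowerChar c2
        let sub2 := sub1.getD number PySem.Dict.empty
        let sub2a := if sub2.contains small then sub2 else sub2.insert small []
        let sub2b :=
          if PySem.Chars.isIn ['_'] item then
            let roman := (PySem.Chars.splitOn item ['_']).getD 1 []
            let lst := sub2a.getD small []
            if roman ∈ lst then sub2a else sub2a.insert small (lst ++ [roman])
          else sub2a
        cons1.insert letter (sub1.insert number sub2b)

def smallStringA (p : Char × List (List Char)) : List Char :=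
  let s := [p.1]
  if p.2 ≠ [] then s ++ ['('] ++ PySem.Chars.join [','] p.2 ++ [')'] else s

def numberStringA (q : Char × D3) : List Char :=
  let small_letter_strings := q.2.items.foldl (fun acc r => acc ++ [smallStringA r]) []
  [q.1] ++ PySem.Chars.join [] (PySem.List.sorted small_letter_strings (fun x => x) false)

def letterStringA (p : Char × D2) : List Char :=
  let number_strings := p.2.items.foldl (fun acc q => acc ++ [numberStringA q]) []
  [p.1] ++ PySem.Chars.join ['+'] (PySem.List.sorted number_strings (fun x => x) false)

def convert_criteria_string (string : String) : String :=
  let cons := (PySem.Chars.splitOn string.toList ['|']).foldl stepA PySem.Dict.empty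
  let letter_strings := cons.items.foldl (fun acc p => acc ++ [letterStringA p]) []
  String.ofList (PySem.Chars.join [';', ' '] (PySem.List.sorted letter_strings (fun x => x) false))

-- ===== PORT B =====
def bRomans (sgroup : List (List Char)) : List (List Char) :=
  sgroup.foldl (fun romans t =>
    if PySem.Chars.isIn ['_'] t then
      let r := (PySem.Chars.splitOn t ['_']).getD 1 []
      if r ∈ romans then romans else romans ++ [r]
    else romans) []

def bSmallPart (ngroup : List (List Char)) (small : Char) : List Char :=
  let sgroup := ngroup.filter (fun t => decide (2 < t.length) && (PySem.Chars.lowerChar (t.getD 2 ' ') == small))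
  let romans := bRomans sgroup
  if romans ≠ [] then [small] ++ ['('] ++ PySem.Chars.join [','] romans ++ [')'] else [small]

def bNumberPart (group : List (List Char)) (number : Char) : List Char :=
  let ngroup := group.filter (fun t => decide (1 < t.length) && (t.getD 1 ' ' == number))
  let smalls := PySem.List.sorted (PySem.Set.ofList ((ngroup.filter (fun t => decide (2 < t.length))).map (fun t => PySem.Chars.lowerChar (t.getD 2 ' ')))) (fun x => x) false
  [number] ++ PySem.Chars.join [] (smalls.map (bSmallPart ngroup))

def bLetterPart (toks : List (List Char)) (letter : Char) : List Char :=
  let group := toks.filter (fun t => PySem.Chars.upperChar (t.headD ' ') == letter)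
  let numbers := PySem.List.sorted (PySem.Set.ofList ((group.filter (fun t => decide (1 < t.length))).map (fun t => t.getD 1 ' '))) (fun x => x) false
  [letter] ++ PySem.Chars.join ['+'] (numbers.map (bNumberPart group))

def convert_criteria_string_alt (string : String) : String :=
  let toks := PySem.Chars.splitOn string.toList ['|']
  let letters := PySem.List.sorted (PySem.Set.ofList (toks.map (fun t => PySem.Chars.upperChar (t.headD ' ')))) (fun x => x) false
  String.ofList (PySem.Chars.join [';', ' '] (letters.map (bLetterPart toks)))

-- ===== PRECONDITION & SPEC =====
-- Pre_ excludes exactly the inputs where some '|'-separated token is empty: there A raises IndexError on item[0] (B raises the same IndexError).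
def Pre_convert_criteria_string (string : String) : Prop :=
  ∀ t ∈ PySem.Chars.splitOn string.toList ['|'], t ≠ []
instance (string : String) : Decidable (Pre_convert_criteria_string string) := by
  unfold Pre_convert_criteria_string; infer_instance
def pvWitness_convert_criteria_string : String := "B1b_iii|B1b_ii|A2|D"

def Spec_convert_criteria_string (string : String) (out : String) : Prop := out = convert_criteria_string_alt string
instance (string : String) (out : String) : Decidable (Spec_convert_criteria_string string out) := by unfold Spec_convert_criteria_string; infer_instance

-- ===== CLAIM (what is proved, stated in full; the proofs are below) =====
def Claim_equal_convert_criteria_string : Prop := ∀ (string : String), Dom_convert_criteria_string string → Pre_convert_criteria_string string → Spec_convert_criteria_string string (convert_criteria_string string)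

-- ===== LEMMAS AND PROOFS =====

def kL (t : List Char) : Char := PySem.Chars.upperChar (t.headD ' ')

def kN (t : List Char) : Char := t.getD 1 ' '

def kS (t : List Char) : Char := PySem.Chars.lowerChar (t.getD 2 ' ')

def romStep (lst : List (List Char)) (t : List Char) : List (List Char) :=
  if PySem.Chars.isIn ['_'] t then
    let r := (PySem.Chars.splitOn t ['_']).getD 1 []
    if r ∈ lst then lst else lst ++ [r]
  else lst

def s3 (d : D3) (t : List Char) : D3 :=
  if 2 < t.length then d.modify (kS t) [] (fun lst => romStep lst t) else d

def s2 (d : D2) (t : List Char) : D2 :=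
  if 1 < t.length then d.modify (kN t) PySem.Dict.empty (fun d3 => s3 d3 t) else d

def s1 (d : D1) (t : List Char) : D1 :=
  d.modify (kL t) PySem.Dict.empty (fun d2 => s2 d2 t)

def WF2 (d2 : D2) : Prop := d2.keys.Nodup ∧ ∀ d3 ∈ d2.values, d3.keys.Nodup

def WF (cons : D1) : Prop := cons.keys.Nodup ∧ ∀ d2 ∈ cons.values, WF2 d2

theorem getD_values {ν : Type} (d : PySem.Dict Char ν) (k : Char) (dflt : ν) :
    d.getD k dflt = dflt ∨ d.getD k dflt ∈ d.values := by
  cases h : d.get? k with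
  | none => left; exact PySem.Dict.getD_of_get?_eq_none _ _ h
  | some v =>
    right
    rw [PySem.Dict.getD_of_get?_eq_some _ _ h]
    exact List.mem_map.mpr ⟨(k, v), PySem.Dict.mem_items_of_get?_eq_some _ h, rfl⟩

theorem nodup_s3 (d : D3) (t : List Char) (h : d.keys.Nodup) : (s3 d t).keys.Nodup := by
  unfold s3 PySem.Dict.modify
  split
  · exact PySem.Dict.nodup_keys_insert _ _ _ h
  · exact h

theorem WF2_s2 (d : D2) (t : List Char) (h : WF2 d) : WF2 (s2 d t) := by
  unfold s2 PySem.Dict.modify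
  split
  · constructor
    · exact PySem.Dict.nodup_keys_insert _ _ _ h.1
    · intro d3 hm
      rcases PySem.Dict.mem_values_insert _ _ _ _ hm with h3 | h3
      · subst h3
        apply nodup_s3
        rcases getD_values d (kN t) PySem.Dict.empty with he | he
        · rw [he]; exact List.Pairwise.nil
        · exact h.2 _ he
      · exact h.2 _ h3
  · exact h

theorem WF_s1 (cons : D1) (t : List Char) (h : WF cons) : WF (s1 cons t) := by
  unfold s1 PySem.Dict.modify
  constructor
  · exact PySem.Dict.nodup_keys_insert _ _ _ h.1
  · intro d2 hm
    rcases PySem.Dict.mem_values_insert _ _ _ _ hm with h2 | h2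
    · subst h2
      apply WF2_s2
      rcases getD_values cons (kL t) PySem.Dict.empty with he | he
      · rw [he]; exact ⟨List.Pairwise.nil, by intro d3 h3; simp [PySem.Dict.empty, PySem.Dict.values] at h3⟩
      · exact h.2 _ he
    · exact h.2 _ h2

theorem insert_getD_self {ν : Type} (d : PySem.Dict Char ν) (k : Char) (dflt : ν)
    (hc : d.contains k = true) (hnd : d.keys.Nodup) : d.insert k (d.getD k dflt) = d := by
  apply PySem.Dict.ext
  rw [PySem.Dict.items_insert_of_contains _ _ hc]
  conv_rhs => rw [← List.map_id d.items]
  apply List.map_congr_left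
  rintro ⟨a, v⟩ hp
  by_cases hak : a = k
  · subst hak
    have := PySem.Dict.getD_of_mem_items _ hp hnd dflt
    simp [this]
  · simp [hak]

theorem ensure_eq {ν : Type} (d : PySem.Dict Char ν) (k : Char) (dflt : ν) (hnd : d.keys.Nodup) :
    (if d.contains k then d else d.insert k dflt) = d.insert k (d.getD k dflt) := by
  by_cases hc : d.contains k = true
  · rw [if_pos hc, insert_getD_self d k dflt hc hnd]
  · rw [if_neg hc, PySem.Dict.getD_of_not_contains _ _ (by simpa using hc)]

theorem ensure_getD {ν : Type} (d : PySem.Dict Char ν) (k : Char) (dflt : ν) :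
    (if d.contains k then d else d.insert k dflt).getD k dflt = d.getD k dflt := by
  by_cases hc : d.contains k = true
  · rw [if_pos hc]
  · rw [if_neg hc, PySem.Dict.getD_insert_self, PySem.Dict.getD_of_not_contains _ _ (by simpa using hc)]

theorem ensure_insert {ν : Type} (d : PySem.Dict Char ν) (k : Char) (dflt v : ν) :
    (if d.contains k then d else d.insert k dflt).insert k v = d.insert k v := by
  by_cases hc : d.contains k = true
  · rw [if_pos hc]
  · rw [if_neg hc, PySem.Dict.insert_insert_self]

theorem stepA_eq_s1 (cons : D1) (t : List Char) (ht : t ≠ []) (h : WF cons) :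
    stepA cons t = s1 cons t := by
  match t with
  | [] => exact absurd rfl ht
  | [c0] =>
    show (if cons.contains (PySem.Chars.upperChar c0) then cons else cons.insert _ PySem.Dict.empty) = _
    rw [ensure_eq _ _ _ h.1]
    simp only [s1, s2, kL, PySem.Dict.modify, List.headD, List.length]
    norm_num
  | [c0, c1] =>
    have hsub : WF2 (cons.getD (PySem.Chars.upperChar c0) PySem.Dict.empty) := by
      rcases getD_values cons (PySem.Chars.upperChar c0) PySem.Dict.empty with he | he
      · rw [he]; exact ⟨List.Pairwise.nil, by intro d3 h3; simp [PySem.Dict.empty, PySem.Dict.values] at h3⟩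
      · exact h.2 _ he
    show ((if cons.contains _ then cons else cons.insert _ _).insert (PySem.Chars.upperChar c0)
        (if ((if cons.contains _ then cons else cons.insert _ _).getD _ PySem.Dict.empty).contains c1
         then ((if cons.contains _ then cons else cons.insert _ _).getD _ PySem.Dict.empty)
         else ((if cons.contains _ then cons else cons.insert _ _).getD _ PySem.Dict.empty).insert c1 PySem.Dict.empty)) = _
    rw [ensure_insert, ensure_getD, ensure_eq _ _ _ hsub.1]
    simp only [s1, s2, s3, kL, kN, PySem.Dict.modify, List.headD, List.getD, List.length]
    norm_num
  | c0 :: c1 :: c2 :: r =>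
    have hsub : WF2 (cons.getD (PySem.Chars.upperChar c0) PySem.Dict.empty) := by
      rcases getD_values cons (PySem.Chars.upperChar c0) PySem.Dict.empty with he | he
      · rw [he]; exact ⟨List.Pairwise.nil, by intro d3 h3; simp [PySem.Dict.empty, PySem.Dict.values] at h3⟩
      · exact h.2 _ he
    have hsub2 : ((cons.getD (PySem.Chars.upperChar c0) PySem.Dict.empty).getD c1 PySem.Dict.empty).keys.Nodup := by
      rcases getD_values (cons.getD (PySem.Chars.upperChar c0) PySem.Dict.empty) c1 PySem.Dict.empty with he | he
      · rw [he]; exact List.Pairwise.nil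
      · exact hsub.2 _ he
    simp only [stepA, ensure_getD, ensure_insert]
    simp only [s1, s2, s3, kL, kN, kS, romStep, PySem.Dict.modify, List.headD, List.getD,
      List.getElem?_cons_succ, List.getElem?_cons_zero, Option.getD_some, List.length]
    norm_num
    set sub2 := (cons.getD (PySem.Chars.upperChar c0) PySem.Dict.empty).getD c1 PySem.Dict.empty with hs2
    split_ifs <;>
      first
        | rfl
        | (rw [insert_getD_self _ (PySem.Chars.lowerChar c2) [] (by assumption) hsub2])
        | (rw [PySem.Dict.getD_of_not_contains sub2 ([] : List (List Char)) (by simp only [Bool.not_eq_true] at *; assumption)])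

theorem foldl_stepA_eq (l : List (List Char)) (d : D1) (h : WF d) (hl : ∀ t ∈ l, t ≠ []) :
    l.foldl stepA d = l.foldl s1 d := by
  induction l generalizing d with
  | nil => rfl
  | cons a l ih =>
    simp only [List.foldl_cons]
    rw [stepA_eq_s1 d a (hl a (by simp)) h]
    exact ih _ (WF_s1 d a h) (fun t ht => hl t (by simp [ht]))

theorem getD_foldl_modifyKey {σ : Type} (key : List Char → Char) (F : σ → List Char → σ)
    (init : σ) (l : List (List Char)) (d : PySem.Dict Char σ) (c : Char) :
    (l.foldl (fun d t => d.modify (key t) init (fun s => F s t)) d).getD c init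
      = (l.filter (fun t => key t == c)).foldl F (d.getD c init) := by
  induction l generalizing d with
  | nil => rfl
  | cons a l ih =>
    simp only [List.foldl_cons, List.filter_cons]
    rw [ih]
    by_cases hk : key a = c
    · simp only [hk, beq_self_eq_true, if_pos, List.foldl_cons]
      rw [PySem.Dict.getD_modify]
      simp
    · have : (key a == c) = false := by simpa using hk
      simp only [this, Bool.false_eq_true, if_false]
      rw [PySem.Dict.getD_modify, if_neg (Ne.symm hk)]

theorem sorted_map_cons (xs : List Char) (f : Char → List Char) :
    PySem.List.sorted ((PySem.Set.ofList xs).map (fun k => k :: f k)) (fun x => x) false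
      = (PySem.List.sorted (PySem.Set.ofList xs) (fun x => x) false).map (fun k => k :: f k) := by
  have h : (fun (a b : List Char) => a.decidableLT b) = @LinearOrder.toDecidableLT _ List.instLinearOrder := by
    funext a b; exact Subsingleton.elim _ _
  rw [show (fun (a b : List Char) => a.decidableLT b) = @LinearOrder.toDecidableLT _ List.instLinearOrder from h]
  apply PySem.List.sorted_eq_of_perm_of_pairwise_lt
  · exact ((PySem.List.sorted_perm _ _ _)).map _
  · rw [List.pairwise_map]
    apply (PySem.List.sorted_ofList_pairwise_lt xs).imp
    intro a b hab
    exact List.cons_lt_cons_iff.mpr (Or.inl hab)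

theorem dict_items_foldl {σ : Type} (key : List Char → Char) (F : σ → List Char → σ)
    (init : σ) (l : List (List Char)) :
    (l.foldl (fun d t => d.modify (key t) init (fun s => F s t)) PySem.Dict.empty).items
      = (PySem.Set.ofList (l.map key)).map
          (fun c => (c, (l.filter (fun t => key t == c)).foldl F init)) := by
  have hkeys : (l.foldl (fun d t => d.modify (key t) init (fun s => F s t)) PySem.Dict.empty).keys
      = PySem.Set.ofList (l.map key) := by
    have := PySem.Dict.keys_foldl_modify_key l key init (fun _ t => fun s => F s t) PySem.Dict.empty
    simpa [PySem.Set.update_nil_left] using this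
  have hnd : (l.foldl (fun d t => d.modify (key t) init (fun s => F s t)) PySem.Dict.empty).keys.Nodup := by
    rw [hkeys]; exact PySem.Set.nodup_ofList _
  rw [PySem.Dict.items_eq_map_keys _ hnd init, hkeys]
  apply List.map_congr_left
  intro c _
  rw [getD_foldl_modifyKey key F init l PySem.Dict.empty c]
  simp [PySem.Dict.getD_empty]

theorem bRomans_eq (l : List (List Char)) : bRomans l = l.foldl romStep [] := rfl

-- level-3: A's small-letter strings of the dict built from g2 = B's parts over the sorted distinct smalls

theorem bSmallPart_cons (g2 : List (List Char)) (c : Char) :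
    bSmallPart g2 c = c :: (bSmallPart g2 c).tail := by
  simp only [bSmallPart]; split_ifs <;> rfl

theorem A_small_sorted (g2 : List (List Char)) :
    PySem.List.sorted ((g2.foldl s3 PySem.Dict.empty).items.foldl (fun acc r => acc ++ [smallStringA r]) []) (fun x => x) false
      = (PySem.List.sorted (PySem.Set.ofList ((g2.filter (fun t => decide (2 < t.length))).map (fun t => PySem.Chars.lowerChar (t.getD 2 ' ')))) (fun x => x) false).map (bSmallPart g2) := by
  have hfold : g2.foldl s3 PySem.Dict.empty
      = (g2.filter (fun t => decide (2 < t.length))).foldl (fun d t => d.modify (kS t) [] (fun s => romStep s t)) PySem.Dict.empty :=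
    PySem.List.foldl_ite_eq_foldl_filter (p := fun t : List Char => 2 < t.length)
      (fun d t => d.modify (kS t) [] (fun s => romStep s t)) g2 PySem.Dict.empty
  rw [hfold, PySem.List.foldl_append_singleton_eq_map, List.nil_append,
    dict_items_foldl kS romStep [] (g2.filter (fun t => decide (2 < t.length))), List.map_map]
  have hkSmap : (g2.filter (fun t => decide (2 < t.length))).map kS
      = (g2.filter (fun t => decide (2 < t.length))).map (fun t => PySem.Chars.lowerChar (t.getD 2 ' ')) := rfl
  have hshape : ∀ c, (smallStringA ∘ fun c => (c, ((g2.filter (fun t => decide (2 < t.length))).filter (fun t => kS t == c)).foldl romStep [])) c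
      = c :: (bSmallPart g2 c).tail := by
    intro c
    have hfil : (g2.filter (fun t => decide (2 < t.length))).filter (fun t => kS t == c)
        = g2.filter (fun t => decide (2 < t.length) && (PySem.Chars.lowerChar (t.getD 2 ' ') == c)) := by
      rw [List.filter_filter]
      exact List.filter_congr (fun a _ => by rw [Bool.and_comm]; rfl)
    simp only [Function.comp, hfil]
    simp only [smallStringA, bSmallPart, bRomans_eq]
    split_ifs <;> simp_all
  have hmap : List.map (smallStringA ∘ fun c => (c, ((g2.filter (fun t => decide (2 < t.length))).filter (fun t => kS t == c)).foldl romStep []))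
        (PySem.Set.ofList ((g2.filter (fun t => decide (2 < t.length))).map kS))
      = List.map (fun c => c :: (bSmallPart g2 c).tail)
        (PySem.Set.ofList ((g2.filter (fun t => decide (2 < t.length))).map kS)) :=
    List.map_congr_left (fun c _ => hshape c)
  rw [hmap, sorted_map_cons, ← hkSmap]
  exact List.map_congr_left (fun c _ => (bSmallPart_cons g2 c).symm)

theorem bNumberPart_cons (gL : List (List Char)) (n : Char) :
    bNumberPart gL n = n :: (bNumberPart gL n).tail := rfl

theorem bLetterPart_cons (toks : List (List Char)) (L : Char) :
    bLetterPart toks L = L :: (bLetterPart toks L).tail := rfl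

theorem A_num (gL : List (List Char)) (n : Char) :
    numberStringA (n, ((gL.filter (fun t => decide (1 < t.length))).filter (fun t => kN t == n)).foldl s3 PySem.Dict.empty)
      = bNumberPart gL n := by
  have hfil : (gL.filter (fun t => decide (1 < t.length))).filter (fun t => kN t == n)
      = gL.filter (fun t => decide (1 < t.length) && (t.getD 1 ' ' == n)) := by
    rw [List.filter_filter]
    exact List.filter_congr (fun a _ => by rw [Bool.and_comm]; rfl)
  simp only [numberStringA, bNumberPart, hfil]
  rw [A_small_sorted]

theorem A_letter (toks : List (List Char)) (L : Char) :
    letterStringA (L, (toks.filter (fun t => PySem.Chars.upperChar (t.headD ' ') == L)).foldl s2 PySem.Dict.empty)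
      = bLetterPart toks L := by
  set gL := toks.filter (fun t => PySem.Chars.upperChar (t.headD ' ') == L) with hgL
  have hfold : gL.foldl s2 PySem.Dict.empty
      = (gL.filter (fun t => decide (1 < t.length))).foldl (fun d t => d.modify (kN t) PySem.Dict.empty (fun s => s3 s t)) PySem.Dict.empty :=
    PySem.List.foldl_ite_eq_foldl_filter (p := fun t : List Char => 1 < t.length)
      (fun d t => d.modify (kN t) PySem.Dict.empty (fun s => s3 s t)) gL PySem.Dict.empty
  simp only [letterStringA, bLetterPart]
  rw [hfold, PySem.List.foldl_append_singleton_eq_map, List.nil_append,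
    dict_items_foldl kN s3 PySem.Dict.empty (gL.filter (fun t => decide (1 < t.length))), List.map_map]
  have hkNmap : (gL.filter (fun t => decide (1 < t.length))).map kN
      = (gL.filter (fun t => decide (1 < t.length))).map (fun t => t.getD 1 ' ') := rfl
  have hmap : List.map (numberStringA ∘ fun c => (c, ((gL.filter (fun t => decide (1 < t.length))).filter (fun t => kN t == c)).foldl s3 PySem.Dict.empty))
        (PySem.Set.ofList ((gL.filter (fun t => decide (1 < t.length))).map kN))
      = List.map (fun c => c :: (bNumberPart gL c).tail)
        (PySem.Set.ofList ((gL.filter (fun t => decide (1 < t.length))).map kN)) :=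
    List.map_congr_left (fun c _ => by
      simpa using (A_num gL c).trans (bNumberPart_cons gL c))
  rw [hmap, sorted_map_cons, ← hkNmap]
  have := List.map_congr_left (l := PySem.List.sorted (PySem.Set.ofList ((gL.filter (fun t => decide (1 < t.length))).map kN)) (fun x => x) false)
    (fun c _ => (bNumberPart_cons gL c).symm)
  rw [this]

theorem main (string : String)
    (hpre : ∀ t ∈ PySem.Chars.splitOn string.toList ['|'], t ≠ []) :
    convert_criteria_string string = convert_criteria_string_alt string := by
  simp only [convert_criteria_string, convert_criteria_string_alt]
  set toks := PySem.Chars.splitOn string.toList ['|'] with htoks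
  have hWFe : WF PySem.Dict.empty := by
    constructor
    · rw [PySem.Dict.keys_empty]; exact List.Pairwise.nil
    · intro d2 h2; simp [PySem.Dict.empty, PySem.Dict.values] at h2
  rw [foldl_stepA_eq toks PySem.Dict.empty hWFe hpre]
  have hfold : toks.foldl s1 PySem.Dict.empty
      = toks.foldl (fun d t => d.modify (kL t) PySem.Dict.empty (fun s => s2 s t)) PySem.Dict.empty := rfl
  rw [hfold, PySem.List.foldl_append_singleton_eq_map, List.nil_append,
    dict_items_foldl kL s2 PySem.Dict.empty toks, List.map_map]
  have hkLmap : toks.map kL = toks.map (fun t => PySem.Chars.upperChar (t.headD ' ')) := rfl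
  have hmap : List.map (letterStringA ∘ fun c => (c, (toks.filter (fun t => kL t == c)).foldl s2 PySem.Dict.empty))
        (PySem.Set.ofList (toks.map kL))
      = List.map (fun c => c :: (bLetterPart toks c).tail) (PySem.Set.ofList (toks.map kL)) :=
    List.map_congr_left (fun c _ => (A_letter toks c).trans (bLetterPart_cons toks c))
  rw [hmap, sorted_map_cons, ← hkLmap]
  have := List.map_congr_left (l := PySem.List.sorted (PySem.Set.ofList (toks.map kL)) (fun x => x) false)
    (fun c _ => (bLetterPart_cons toks c).symm)
  rw [this]

-- ===== VERDICT (by name: the statement is the Claim_ definition above) =====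
theorem convert_criteria_string_spec : Claim_equal_convert_criteria_string := by
  intro string _ hpre
  exact main string hpre
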